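-- pv_equiv track=rewrite | github.com/Name-San/payslip_processing_flask_app | modules/image_ocr.py | search_for_string
-- ===== SOURCE A (Python) =====
-- def search_for_string(text, search_term):
--     """
--     Search for specified strings in the extracted text.
--
--     Args:
--         text (str): Extracted text from the image.
--         search_term (list): List of strings to search for.
--
--     Returns:
--         dict: Search results indicating the presence of each term.
--     """
--
--     try:
--         src_results = {term: '' for term in search_term}
--         # Split text into lines and search for terms
--         for line in text.splitlines():
--             for term in search_term:
--                 if term in line:  # Check if the term is in the line
--                     src_results[term] = line.strip()
--
--
--         for term in search_term:
--             filter_values = []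
--             for char in range(len(term)+2, len(src_results[term]), 1):
--                 filter_values.append(src_results[term][char])
--             src_results[term] = ''.join(filter_values).strip()
--
--         return src_results
--
--     except Exception as e:
--         return f"Error encoutered in searching: {e}"
-- ===== SOURCE B (Python) =====
-- def search_for_string(text, search_term):
--     """
--     Backward single pass: scan lines in reverse keeping the set of still-unresolved
--     terms; the first hit in reverse is the last occurrence forward, and its result
--     is computed directly by slicing instead of A's per-character copy loop.
--     """
--     try:
--         src_results = {term: '' for term in search_term}
--         pending = set(src_results)
--         for line in reversed(text.splitlines()):
--             if not pending:
--                 break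
--             stripped = line.strip()
--             for term in [t for t in src_results if t in pending]:
--                 if term in line:
--                     src_results[term] = stripped[len(term) + 2:].strip()
--                     pending.discard(term)
--         return src_results
--     except Exception as e:
--         return f"Error encoutered in searching: {e}"
-- ===== Notes on version B (the rewrite author's own statement) =====
-- stated objective: alternative
-- what changed: Replaces A's forward overwrite-every-match scan plus a second per-character copy pass with a single reverse scan that keeps a set of unresolved terms, resolves each term at its first reverse (= last forward) hit by direct slicing, and stops early when the set empties.
-- outside the precondition, e.g. on search_for_string('a: b c', ['a', 'a']): A returns {'a': ''}, B returns {'a': 'b c'}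
import Mathlib
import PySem

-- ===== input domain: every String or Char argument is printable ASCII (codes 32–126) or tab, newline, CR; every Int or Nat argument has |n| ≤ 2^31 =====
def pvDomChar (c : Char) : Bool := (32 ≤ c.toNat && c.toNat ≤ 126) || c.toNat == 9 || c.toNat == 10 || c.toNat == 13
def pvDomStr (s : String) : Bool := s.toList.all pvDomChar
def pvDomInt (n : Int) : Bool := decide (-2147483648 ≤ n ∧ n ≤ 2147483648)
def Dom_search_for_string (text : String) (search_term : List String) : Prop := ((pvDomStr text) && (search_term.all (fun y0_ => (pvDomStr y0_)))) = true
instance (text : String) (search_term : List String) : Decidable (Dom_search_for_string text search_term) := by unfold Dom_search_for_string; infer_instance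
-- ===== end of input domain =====

-- B replaces A's forward overwrite-every-match scan + per-character second pass with one
-- reverse scan keeping a set of unresolved terms (first reverse hit = last forward hit),
-- slicing each result directly; equivalence is proved for duplicate-free term lists.

-- ===== PORT A =====
-- src_results = {term: '' for term in search_term}
def sfsInitA (search_term : List String) : PySem.Dict String String :=
  search_term.foldl (fun d term => d.insert term "") PySem.Dict.empty

-- for line in lines: for term in search_term: if term in line: src_results[term] = line.strip()
def sfsPass1 (search_term : List String) (lines : List String)
    (d : PySem.Dict String String) : PySem.Dict String String :=
  lines.foldl (fun d line =>
    search_term.foldl (fun d term =>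
      if PySem.Str.isIn term line then d.insert term (PySem.Str.strip line) else d) d) d

-- filter_values = []; for char in range(len(term)+2, len(s), 1): filter_values.append(s[char]);
-- ''.join(filter_values).strip()  (the one-char strings are accumulated as chars; exact)
def sfsFilterVal (term s : String) : String :=
  PySem.Str.strip (String.ofList
    ((PySem.List.pyRange (PySem.Str.len term + 2) (PySem.Str.len s) 1).foldl
      (fun acc char => acc ++ [PySem.List.pyGetD s.toList char ' ']) []))
      -- s[char]: char < len(s) always, so pyGetD's default is never used (no IndexError)

-- for term in search_term: src_results[term] = ...  (term is always a key, no KeyError)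
def sfsPass2 (search_term : List String) (d : PySem.Dict String String) :
    PySem.Dict String String :=
  search_term.foldl (fun d term => d.insert term (sfsFilterVal term (d.getD term ""))) d

def search_for_string (text : String) (search_term : List String) : List (String × String) :=
  (sfsPass2 search_term
    (sfsPass1 search_term (PySem.Str.splitlines text) (sfsInitA search_term))).items

-- ===== PORT B =====
-- src_results = {term: '' for term in search_term}
def sfsInitB (search_term : List String) : PySem.Dict String String :=
  search_term.foldl (fun d term => d.insert term "") PySem.Dict.empty

-- inner loop of Source B: for term in [t for t in src_results if t in pending]: resolve hits on this line
def sfsLineStep (line : String) (keysOrder : List String)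
    (st : PySem.Dict String String × PySem.Set String) :
    PySem.Dict String String × PySem.Set String :=
  (keysOrder.filter (fun t => PySem.Set.contains st.2 t)).foldl
    (fun st term =>
      if PySem.Str.isIn term line then
        (st.1.insert term
           (PySem.Str.strip (PySem.Str.slice (PySem.Str.strip line) (some (PySem.Str.len term + 2)) none)),
         PySem.Set.discard st.2 term)
      else st) st

-- for line in reversed(...): if not pending: break; … (structural recursion over the reversed lines)
def sfsScan (lines : List String) (keysOrder : List String)
    (st : PySem.Dict String String × PySem.Set String) : PySem.Dict String String :=
  match lines with
  | [] => st.1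
  | line :: rest =>
    if st.2 = [] then st.1
    else sfsScan rest keysOrder (sfsLineStep line keysOrder st)

def search_for_string_alt (text : String) (search_term : List String) : List (String × String) :=
  let src_results := sfsInitB search_term
  let pending : PySem.Set String := PySem.Set.ofList src_results.keys
  (sfsScan (PySem.Str.splitlines text).reverse src_results.keys (src_results, pending)).items

-- ===== PRECONDITION & SPEC =====
-- Pre_ excludes lists with duplicate search terms: there A's second pass runs once per list
-- element, so a duplicated term's already-extracted value is accidentally sliced again.
def Pre_search_for_string (text : String) (search_term : List String) : Prop :=
  search_term.Nodup
instance (text : String) (search_term : List String) : Decidable (Pre_search_for_string text search_term) := by unfold Pre_search_for_string; infer_instance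

def pvWitness_search_for_string : String × List String :=
  ("Name: Bob\nTotal: 12", ["Total", "Name"])

def Spec_search_for_string (text : String) (search_term : List String) (out : List (String × String)) : Prop := out = search_for_string_alt text search_term
instance (text : String) (search_term : List String) (out : List (String × String)) : Decidable (Spec_search_for_string text search_term out) := by unfold Spec_search_for_string; infer_instance

-- ===== CLAIM (what is proved, stated in full; the proofs are below) =====
def Claim_equal_search_for_string : Prop := ∀ (text : String) (search_term : List String), Dom_search_for_string text search_term → Pre_search_for_string text search_term → Spec_search_for_string text search_term (search_for_string text search_term)

-- ===== LEMMAS AND PROOFS =====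

-- the value both programs associate to term t when the stripped last matching line is v
def pvPost (t v : String) : String :=
  PySem.Str.strip (String.ofList (v.toList.drop (PySem.Str.len t + 2).toNat))

-- the stripped last line containing t ('' if none)
def pvStripLast (t : String) (lines : List String) : String :=
  ((lines.filter (fun l => PySem.Str.isIn t l)).getLast?).elim "" PySem.Str.strip

theorem pv_foldl_snoc (xs : List Char) (acc : List Char) :
    xs.foldl (fun acc c => acc ++ [c]) acc = acc ++ xs := by
  induction xs generalizing acc with
  | nil => simp
  | cons c xs ih => simp [ih]

-- A's char-copy loop is the drop of the value's characters
theorem pv_filterVal_eq_post (t s : String) : sfsFilterVal t s = pvPost t s := by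
  unfold sfsFilterVal pvPost
  have h0 : (0:Int) ≤ PySem.Str.len t + 2 := by
    rw [PySem.Str.len_eq]; have := Int.natCast_nonneg t.toList.length; omega
  have hb : PySem.Str.len s = PySem.List.len s.toList := by
    rw [PySem.Str.len_eq]; rfl
  rw [hb, PySem.List.foldl_pyRange_pyGetD s.toList ' ' (fun acc c => acc ++ [c]) [] h0,
    pv_foldl_snoc]
  simp

-- dict built from {term: '' for term in ts}: get?
theorem pv_get?_init (ts : List String) (d : PySem.Dict String String) (x : String) :
    (ts.foldl (fun d term => d.insert term "") d).get? x
    = if x ∈ ts then some "" else d.get? x := by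
  induction ts generalizing d with
  | nil => simp
  | cons t ts ih =>
    simp only [List.foldl_cons, ih, List.mem_cons, PySem.Dict.get?_insert]
    by_cases hxt : x = t <;> by_cases hmem : x ∈ ts <;> simp [hxt, hmem]

theorem pv_items_init (ts : List String) (h : ts.Nodup) :
    (sfsInitA ts).items = ts.map (fun t => (t, "")) := by
  unfold sfsInitA
  have := PySem.Dict.items_foldl_insert_fresh ts (fun t => t) (fun _ => "") PySem.Dict.empty
    (by intro a _; simp) (by simpa using h)
  simpa using this

theorem pv_keys_init (ts : List String) (h : ts.Nodup) : (sfsInitA ts).keys = ts := by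
  have h1 := pv_items_init ts h
  have h2 : (sfsInitA ts).keys = (sfsInitA ts).items.map Prod.fst := by
    simp [PySem.Dict.keys]
  rw [h2, h1, List.map_map]
  simp [Function.comp_def]

-- A's line loop, inner fold over the terms
theorem pv_A_inner (ts : List String) (line : String) (d : PySem.Dict String String) (x : String) :
    (ts.foldl (fun d term => if PySem.Str.isIn term line then d.insert term (PySem.Str.strip line) else d) d).get? x
    = if x ∈ ts ∧ PySem.Str.isIn x line then some (PySem.Str.strip line) else d.get? x := by
  induction ts generalizing d with
  | nil => simp
  | cons t ts ih =>
    rw [List.foldl_cons, ih]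
    by_cases hc : x ∈ ts ∧ PySem.Str.isIn x line
    · rw [if_pos hc, if_pos ⟨List.mem_cons_of_mem _ hc.1, hc.2⟩]
    · rw [if_neg hc]
      by_cases hxt : x = t
      · subst hxt
        by_cases hx : PySem.Str.isIn x line
        · rw [if_pos hx, PySem.Dict.get?_insert, if_pos rfl,
            if_pos ⟨List.mem_cons_self, hx⟩]
        · rw [if_neg hx, if_neg (fun h => hx h.2)]
      · have h2 : ¬(x ∈ t :: ts ∧ PySem.Str.isIn x line) := by
          rintro ⟨hm, hi⟩
          rcases List.mem_cons.mp hm with rfl | hm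
          · exact hxt rfl
          · exact hc ⟨hm, hi⟩
        rw [if_neg h2]
        by_cases hin : PySem.Str.isIn t line
        · rw [if_pos hin, PySem.Dict.get?_insert, if_neg hxt]
        · rw [if_neg hin]

-- A's line loop over all lines
theorem pv_A_lines (ts : List String) (lines : List String) (d : PySem.Dict String String)
    (x : String) (hx : x ∈ ts) :
    (sfsPass1 ts lines d).get? x
    = ((lines.filter (fun l => PySem.Str.isIn x l)).getLast?).elim (d.get? x)
        (fun l => some (PySem.Str.strip l)) := by
  unfold sfsPass1
  induction lines generalizing d with
  | nil => simp
  | cons l ls ih =>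
    rw [List.foldl_cons, ih, List.filter_cons]
    by_cases hl : PySem.Str.isIn x l
    · rw [if_pos (by exact hl)]
      rw [pv_A_inner ts l d x, if_pos ⟨hx, hl⟩]
      cases hfl : (ls.filter (fun l => PySem.Str.isIn x l)).getLast? with
      | none =>
        have h0 : ls.filter (fun l => PySem.Str.isIn x l) = [] := List.getLast?_eq_none_iff.mp hfl
        rw [h0]; simp
      | some l' =>
        have h1 : l' ∈ (l :: ls.filter (fun l => PySem.Str.isIn x l)).getLast? :=
          List.mem_getLast?_cons (Option.mem_def.mpr hfl)
        rw [Option.mem_def.mp h1]; rfl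
    · rw [if_neg (by exact hl)]
      rw [pv_A_inner ts l d x, if_neg (fun h => hl h.2)]

-- A's second pass: untouched keys
theorem pv_A_pass2_not_mem (ts : List String) (d : PySem.Dict String String)
    (x : String) (hx : x ∉ ts) :
    (sfsPass2 ts d).get? x = d.get? x := by
  unfold sfsPass2
  induction ts generalizing d with
  | nil => simp
  | cons t ts ih =>
    simp only [List.mem_cons, not_or] at hx
    rw [List.foldl_cons, ih _ hx.2, PySem.Dict.get?_insert, if_neg hx.1]

-- A's second pass: each key transformed once (needs Nodup)
theorem pv_A_pass2_mem (ts : List String) (d : PySem.Dict String String)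
    (x : String) (hx : x ∈ ts) (h : ts.Nodup) :
    (sfsPass2 ts d).get? x = some (sfsFilterVal x ((d.get? x).getD "")) := by
  unfold sfsPass2
  induction ts generalizing d with
  | nil => simp at hx
  | cons t ts ih =>
    rw [List.foldl_cons]
    rcases List.mem_cons.mp hx with hxt | hmem
    · subst hxt
      have hnot : x ∉ ts := (List.nodup_cons.mp h).1
      have hrw := pv_A_pass2_not_mem ts (d.insert x (sfsFilterVal x (d.getD x ""))) x hnot
      unfold sfsPass2 at hrw
      rw [hrw, PySem.Dict.get?_insert, if_pos rfl, PySem.Dict.getD_eq_get?_getD]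
    · have hne : x ≠ t := by
        rintro rfl; exact (List.nodup_cons.mp h).1 hmem
      rw [ih _ hmem (List.nodup_cons.mp h).2, PySem.Dict.get?_insert, if_neg hne]

-- a fold whose every step preserves the keys (given ts ⊆ keys) preserves the keys
theorem pv_keys_fold {β : Type} (l : List β) (ts : List String)
    (step : PySem.Dict String String → β → PySem.Dict String String)
    (hstep : ∀ d b, b ∈ l → (∀ t ∈ ts, t ∈ d.keys) → (step d b).keys = d.keys)
    (d : PySem.Dict String String) (hmem : ∀ t ∈ ts, t ∈ d.keys) :
    (l.foldl step d).keys = d.keys := by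
  induction l generalizing d with
  | nil => rfl
  | cons b l ih =>
    have h1 : (step d b).keys = d.keys := hstep d b List.mem_cons_self hmem
    rw [List.foldl_cons, ih (fun d b hb => hstep d b (List.mem_cons_of_mem _ hb))
      (step d b) (by rw [h1]; exact hmem), h1]

theorem pv_keys_pass1 (ts lines : List String) (d : PySem.Dict String String)
    (hmem : ∀ t ∈ ts, t ∈ d.keys) : (sfsPass1 ts lines d).keys = d.keys := by
  unfold sfsPass1
  refine pv_keys_fold lines ts _ ?_ d hmem
  intro d line _ hm
  refine pv_keys_fold ts ts _ ?_ d hm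
  intro d t ht hm2
  by_cases hin : PySem.Str.isIn t line
  · rw [if_pos hin]
    exact PySem.Dict.keys_insert_of_contains d _ ((PySem.Dict.contains_iff_mem_keys _ _).mpr (hm2 t ht))
  · rw [if_neg hin]

theorem pv_keys_pass2 (ts : List String) (d : PySem.Dict String String)
    (hmem : ∀ t ∈ ts, t ∈ d.keys) : (sfsPass2 ts d).keys = d.keys := by
  unfold sfsPass2
  refine pv_keys_fold ts ts _ ?_ d hmem
  intro d t ht hm
  exact PySem.Dict.keys_insert_of_contains d _ ((PySem.Dict.contains_iff_mem_keys _ _).mpr (hm t ht))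

-- reconstruction of items from keys and get?
theorem pv_items_eq_map (d : PySem.Dict String String) (ts : List String) (f : String → String)
    (hk : d.keys = ts) (hn : ts.Nodup) (hg : ∀ t ∈ ts, d.get? t = some (f t)) :
    d.items = ts.map (fun t => (t, f t)) := by
  obtain ⟨l⟩ := d
  have haux : ∀ (l : List (String × String)) (ts : List String),
      l.map Prod.fst = ts → ts.Nodup → (∀ t ∈ ts, (PySem.Dict.mk l).get? t = some (f t)) →
      l = ts.map (fun t => (t, f t)) := by
    intro l
    induction l with
    | nil => intro ts hk _ _; subst hk; rfl
    | cons p rest ih =>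
      intro ts hk hn hg
      obtain ⟨k, v⟩ := p
      subst hk
      simp only [List.map_cons]
      have hni := List.nodup_cons.mp hn
      have hkv : v = f k := by
        have := hg k List.mem_cons_self
        rw [PySem.Dict.get?_mk_cons] at this
        simpa using this
      rw [hkv]
      congr 1
      refine ih (rest.map Prod.fst) rfl hni.2 ?_
      intro t ht
      have h2 := hg t (List.mem_cons_of_mem _ ht)
      rw [PySem.Dict.get?_mk_cons] at h2
      have hne : ¬(k == t) = true := by
        simp only [beq_iff_eq]
        rintro rfl; exact hni.1 ht
      rwa [if_neg hne] at h2
  refine haux l ts ?_ hn hg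
  rw [← hk]
  simp [PySem.Dict.keys]

-- B's inner per-line fold
theorem pv_B_inner (ks : List String) (line : String)
    (st : PySem.Dict String String × PySem.Set String) (x : String) :
    ((ks.foldl (fun st term =>
        if PySem.Str.isIn term line then
          (st.1.insert term
             (PySem.Str.strip (PySem.Str.slice (PySem.Str.strip line) (some (PySem.Str.len term + 2)) none)),
           PySem.Set.discard st.2 term)
        else st) st).1.get? x
      = (if x ∈ ks ∧ PySem.Str.isIn x line then
          some (PySem.Str.strip (PySem.Str.slice (PySem.Str.strip line) (some (PySem.Str.len x + 2)) none))
         else st.1.get? x))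
    ∧ (x ∈ (ks.foldl (fun st term =>
        if PySem.Str.isIn term line then
          (st.1.insert term
             (PySem.Str.strip (PySem.Str.slice (PySem.Str.strip line) (some (PySem.Str.len term + 2)) none)),
           PySem.Set.discard st.2 term)
        else st) st).2 ↔ x ∈ st.2 ∧ ¬(x ∈ ks ∧ PySem.Str.isIn x line)) := by
  induction ks generalizing st with
  | nil => simp
  | cons t ks ih =>
    rw [List.foldl_cons]
    by_cases hin : PySem.Str.isIn t line
    · rw [if_pos hin]
      set st' := (st.1.insert t
          (PySem.Str.strip (PySem.Str.slice (PySem.Str.strip line) (some (PySem.Str.len t + 2)) none)),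
        PySem.Set.discard st.2 t) with hst'
      obtain ⟨ih1, ih2⟩ := ih st'
      constructor
      · rw [ih1]
        by_cases hc : x ∈ ks ∧ PySem.Str.isIn x line
        · rw [if_pos hc, if_pos ⟨List.mem_cons_of_mem _ hc.1, hc.2⟩]
        · rw [if_neg hc]
          by_cases hxt : x = t
          · subst hxt
            rw [show st'.1 = st.1.insert x
                (PySem.Str.strip (PySem.Str.slice (PySem.Str.strip line) (some (PySem.Str.len x + 2)) none)) from rfl,
              PySem.Dict.get?_insert, if_pos rfl, if_pos ⟨List.mem_cons_self, hin⟩]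
          · have h2 : ¬(x ∈ t :: ks ∧ PySem.Str.isIn x line) := by
              rintro ⟨hm, hi⟩
              rcases List.mem_cons.mp hm with rfl | hm
              · exact hxt rfl
              · exact hc ⟨hm, hi⟩
            rw [if_neg h2,
              show st'.1 = st.1.insert t
                (PySem.Str.strip (PySem.Str.slice (PySem.Str.strip line) (some (PySem.Str.len t + 2)) none)) from rfl,
              PySem.Dict.get?_insert, if_neg hxt]
      · rw [ih2]
        have hd : x ∈ st'.2 ↔ x ∈ st.2 ∧ x ≠ t := PySem.Set.mem_discard st.2 t x
        rw [hd]
        constructor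
        · rintro ⟨⟨hx2, hxt⟩, hnc⟩
          refine ⟨hx2, ?_⟩
          rintro ⟨hm, hi⟩
          rcases List.mem_cons.mp hm with rfl | hm
          · exact hxt rfl
          · exact hnc ⟨hm, hi⟩
        · rintro ⟨hx2, hnc⟩
          have hxt : x ≠ t := by rintro rfl; exact hnc ⟨List.mem_cons_self, hin⟩
          refine ⟨⟨hx2, hxt⟩, ?_⟩
          rintro ⟨hm, hi⟩
          exact hnc ⟨List.mem_cons_of_mem _ hm, hi⟩
    · rw [if_neg hin]
      obtain ⟨ih1, ih2⟩ := ih st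
      constructor
      · rw [ih1]
        by_cases hc : x ∈ ks ∧ PySem.Str.isIn x line
        · rw [if_pos hc, if_pos ⟨List.mem_cons_of_mem _ hc.1, hc.2⟩]
        · rw [if_neg hc]
          have h2 : ¬(x ∈ t :: ks ∧ PySem.Str.isIn x line) := by
            rintro ⟨hm, hi⟩
            rcases List.mem_cons.mp hm with rfl | hm
            · exact hin hi
            · exact hc ⟨hm, hi⟩
          rw [if_neg h2]
      · rw [ih2]
        constructor
        · rintro ⟨hx2, hnc⟩
          refine ⟨hx2, ?_⟩
          rintro ⟨hm, hi⟩
          rcases List.mem_cons.mp hm with rfl | hm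
          · exact hin hi
          · exact hnc ⟨hm, hi⟩
        · rintro ⟨hx2, hnc⟩
          refine ⟨hx2, ?_⟩
          rintro ⟨hm, hi⟩
          exact hnc ⟨List.mem_cons_of_mem _ hm, hi⟩

-- B's reverse scan
theorem pv_B_scan (lines keysOrder : List String)
    (st : PySem.Dict String String × PySem.Set String) (x : String)
    (hsub : ∀ y ∈ st.2, y ∈ keysOrder) :
    (sfsScan lines keysOrder st).get? x
    = if x ∈ st.2 then
        ((lines.filter (fun l => PySem.Str.isIn x l)).head?).elim (st.1.get? x)
          (fun l => some (PySem.Str.strip (PySem.Str.slice (PySem.Str.strip l) (some (PySem.Str.len x + 2)) none)))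
      else st.1.get? x := by
  induction lines generalizing st with
  | nil =>
    show st.1.get? x = _
    rw [List.filter_nil]
    split_ifs <;> rfl
  | cons line rest ih =>
    show (if st.2 = [] then st.1 else sfsScan rest keysOrder (sfsLineStep line keysOrder st)).get? x = _
    by_cases hemp : st.2 = []
    · rw [if_pos hemp]
      have hx2 : x ∉ st.2 := by rw [hemp]; exact List.not_mem_nil
      rw [if_neg hx2]
    · rw [if_neg hemp]
      set ks := keysOrder.filter (fun t => PySem.Set.contains st.2 t) with hks
      obtain ⟨B1, B2⟩ := pv_B_inner ks line st x
      have hstep : sfsLineStep line keysOrder st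
          = ks.foldl (fun st term =>
              if PySem.Str.isIn term line then
                (st.1.insert term
                   (PySem.Str.strip (PySem.Str.slice (PySem.Str.strip line) (some (PySem.Str.len term + 2)) none)),
                 PySem.Set.discard st.2 term)
              else st) st := rfl
      have hsub' : ∀ y ∈ (sfsLineStep line keysOrder st).2, y ∈ keysOrder := by
        intro y hy
        rw [hstep] at hy
        exact hsub y ((pv_B_inner ks line st y).2.mp hy).1
      rw [ih (sfsLineStep line keysOrder st) hsub', hstep]
      by_cases hx2 : x ∈ st.2
      · by_cases hxl : PySem.Str.isIn x line
        · have hxk : x ∈ ks := by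
            rw [hks, List.mem_filter]
            exact ⟨hsub x hx2, (PySem.Set.contains_iff _ _).mpr hx2⟩
          have hP : x ∈ ks ∧ PySem.Str.isIn x line := ⟨hxk, hxl⟩
          have hnot : x ∉ (ks.foldl _ st).2 := fun hmem => ((B2.mp hmem).2) hP
          rw [if_neg hnot, B1, if_pos hP, if_pos hx2, List.filter_cons, if_pos (by exact hxl)]
          rfl
        · have hP : ¬(x ∈ ks ∧ PySem.Str.isIn x line) := fun h => hxl h.2
          have hmem : x ∈ (ks.foldl _ st).2 := B2.mpr ⟨hx2, hP⟩
          rw [if_pos hmem, B1, if_neg hP, if_pos hx2, List.filter_cons, if_neg (by exact hxl)]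
      · have hP : ¬(x ∈ ks ∧ PySem.Str.isIn x line) := by
          rintro ⟨hk, _⟩
          rw [hks, List.mem_filter] at hk
          exact hx2 ((PySem.Set.contains_iff _ _).mp hk.2)
        have hnot : x ∉ (ks.foldl _ st).2 := fun hmem => hx2 (B2.mp hmem).1
        rw [if_neg hnot, B1, if_neg hP, if_neg hx2]

theorem pv_B_inner_keys (ks : List String) (line : String)
    (st : PySem.Dict String String × PySem.Set String)
    (hmem : ∀ t ∈ ks, t ∈ st.1.keys) :
    ((ks.foldl (fun st term =>
        if PySem.Str.isIn term line then
          (st.1.insert term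
             (PySem.Str.strip (PySem.Str.slice (PySem.Str.strip line) (some (PySem.Str.len term + 2)) none)),
           PySem.Set.discard st.2 term)
        else st) st).1).keys = st.1.keys := by
  induction ks generalizing st with
  | nil => rfl
  | cons t ks ih =>
    rw [List.foldl_cons]
    by_cases hin : PySem.Str.isIn t line
    · rw [if_pos hin]
      have h1 : (st.1.insert t
          (PySem.Str.strip (PySem.Str.slice (PySem.Str.strip line) (some (PySem.Str.len t + 2)) none))).keys
          = st.1.keys :=
        PySem.Dict.keys_insert_of_contains st.1 _
          ((PySem.Dict.contains_iff_mem_keys _ _).mpr (hmem t List.mem_cons_self))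
      have hm' : ∀ t' ∈ ks, t' ∈ (st.1.insert t
          (PySem.Str.strip (PySem.Str.slice (PySem.Str.strip line) (some (PySem.Str.len t + 2)) none))).keys := by
        intro t' ht'
        rw [h1]
        exact hmem t' (List.mem_cons_of_mem _ ht')
      exact (ih _ hm').trans h1
    · rw [if_neg hin]
      exact ih st (fun t' ht' => hmem t' (List.mem_cons_of_mem _ ht'))

theorem pv_B_scan_keys (lines keysOrder : List String)
    (st : PySem.Dict String String × PySem.Set String)
    (hmem : ∀ t ∈ keysOrder, t ∈ st.1.keys) :
    (sfsScan lines keysOrder st).keys = st.1.keys := by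
  induction lines generalizing st with
  | nil => rfl
  | cons line rest ih =>
    show (if st.2 = [] then st.1
        else sfsScan rest keysOrder (sfsLineStep line keysOrder st)).keys = _
    by_cases hemp : st.2 = []
    · rw [if_pos hemp]
    · rw [if_neg hemp]
      have hkeys : (sfsLineStep line keysOrder st).1.keys = st.1.keys := by
        unfold sfsLineStep
        have hks : ∀ t ∈ keysOrder.filter (fun t => PySem.Set.contains st.2 t), t ∈ st.1.keys :=
          fun t ht => hmem t (List.mem_filter.mp ht).1
        exact pv_B_inner_keys _ line st hks
      rw [ih _ (by rw [hkeys]; exact hmem), hkeys]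

-- B's sliced value is A's char-copied value
theorem pv_post_eq (x l : String) :
    PySem.Str.strip (PySem.Str.slice (PySem.Str.strip l) (some (PySem.Str.len x + 2)) none)
    = pvPost x (PySem.Str.strip l) := by
  unfold pvPost
  have h0 : (0:Int) ≤ PySem.Str.len x + 2 := by
    rw [PySem.Str.len_eq]; have := Int.natCast_nonneg x.toList.length; omega
  rw [← String.toList_inj, PySem.Str.toList_strip, PySem.Str.toList_strip,
    PySem.Str.toList_slice, String.toList_ofList, PySem.Chars.slice,
    PySem.List.slice_from _ h0]

theorem pv_post_empty (x : String) : pvPost x "" = "" := by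
  unfold pvPost
  simp
  decide

theorem pv_A_eq (text : String) (ts : List String) (h : ts.Nodup) :
    search_for_string text ts
    = ts.map (fun t => (t, pvPost t (pvStripLast t (PySem.Str.splitlines text)))) := by
  unfold search_for_string
  have hk0 : (sfsInitA ts).keys = ts := pv_keys_init ts h
  have hm0 : ∀ t ∈ ts, t ∈ (sfsInitA ts).keys := by rw [hk0]; exact fun t ht => ht
  have hk1 := pv_keys_pass1 ts (PySem.Str.splitlines text) _ hm0
  have hm1 : ∀ t ∈ ts,
      t ∈ (sfsPass1 ts (PySem.Str.splitlines text) (sfsInitA ts)).keys := by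
    rw [hk1, hk0]; exact fun t ht => ht
  have hk2 := pv_keys_pass2 ts _ hm1
  refine pv_items_eq_map _ ts _ (by rw [hk2, hk1, hk0]) h ?_
  intro t ht
  rw [pv_A_pass2_mem _ _ _ ht h, pv_A_lines ts _ _ t ht]
  unfold sfsInitA
  rw [pv_get?_init ts PySem.Dict.empty t, if_pos ht]
  unfold pvStripLast
  cases hfl : ((PySem.Str.splitlines text).filter (fun l => PySem.Str.isIn t l)).getLast? with
  | none => rw [pv_filterVal_eq_post]; rfl
  | some l => rw [pv_filterVal_eq_post]; rfl

theorem pv_B_eq (text : String) (ts : List String) (h : ts.Nodup) :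
    search_for_string_alt text ts
    = ts.map (fun t => (t, pvPost t (pvStripLast t (PySem.Str.splitlines text)))) := by
  show (sfsScan (PySem.Str.splitlines text).reverse (sfsInitB ts).keys
      (sfsInitB ts, PySem.Set.ofList (sfsInitB ts).keys)).items = _
  have hInit : sfsInitB ts = sfsInitA ts := rfl
  rw [hInit, pv_keys_init ts h]
  have hm0 : ∀ t ∈ ts, t ∈ (sfsInitA ts).keys := by
    rw [pv_keys_init ts h]; exact fun t ht => ht
  have hkeys := pv_B_scan_keys (PySem.Str.splitlines text).reverse ts
    (sfsInitA ts, PySem.Set.ofList ts) hm0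
  refine pv_items_eq_map _ ts _ (by rw [hkeys]; exact pv_keys_init ts h) h ?_
  intro t ht
  have hsub : ∀ y ∈ (sfsInitA ts, PySem.Set.ofList ts).2, y ∈ ts :=
    fun y hy => (PySem.Set.mem_ofList ts y).mp hy
  rw [pv_B_scan _ ts _ t hsub]
  have ht2 : t ∈ (sfsInitA ts, PySem.Set.ofList ts).2 := (PySem.Set.mem_ofList ts t).mpr ht
  rw [if_pos ht2, List.filter_reverse, List.head?_reverse]
  unfold pvStripLast
  cases hfl : ((PySem.Str.splitlines text).filter (fun l => PySem.Str.isIn t l)).getLast? with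
  | none =>
    show (sfsInitA ts).get? t = _
    unfold sfsInitA
    rw [pv_get?_init ts PySem.Dict.empty t, if_pos ht]
    rw [show Option.elim (α := String) none "" PySem.Str.strip = "" from rfl, pv_post_empty]
  | some l =>
    show some _ = _
    rw [pv_post_eq]
    rfl

-- ===== VERDICT (by name: the statement is the Claim_ definition above) =====
theorem search_for_string_spec : Claim_equal_search_for_string := by
  intro text terms _ hpre
  unfold Spec_search_for_string
  rw [pv_A_eq text terms hpre, pv_B_eq text terms hpre]
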